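-- pv_equiv track=rewrite | github.com/RockinIt-2004/scrap_sentiment | sentiment.py | count_sentiments
-- ===== SOURCE A (Python) =====
-- def count_sentiments(analyzed_reviews):
--     counts = {
--         "positive": 0,
--         "negative": 0,
--         "neutral": 0
--     }
--     for review in analyzed_reviews:
--         sentiment = review.get("sentiment")
--         if sentiment in counts:
--             counts[sentiment] += 1
--     return counts
-- ===== SOURCE B (Python) =====
-- def _delta(s):
--     if s == "positive":
--         return (1, 0, 0)
--     if s == "negative":
--         return (0, 1, 0)
--     if s == "neutral":
--         return (0, 0, 1)
--     return (0, 0, 0)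
--
--
-- def count_sentiments(analyzed_reviews):
--     vecs = [_delta(r.get("sentiment")) for r in analyzed_reviews]
--     return {
--         "positive": sum(v[0] for v in vecs),
--         "negative": sum(v[1] for v in vecs),
--         "neutral": sum(v[2] for v in vecs),
--     }
-- ===== Notes on version B (the rewrite author's own statement) =====
-- stated objective: alternative
-- what changed: A's guarded in-place dict increment loop is replaced by mapping every review to a unit 3-vector via a total delta function and taking three componentwise sums, so the membership test and mutable dict accumulator disappear.
import Mathlib
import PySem

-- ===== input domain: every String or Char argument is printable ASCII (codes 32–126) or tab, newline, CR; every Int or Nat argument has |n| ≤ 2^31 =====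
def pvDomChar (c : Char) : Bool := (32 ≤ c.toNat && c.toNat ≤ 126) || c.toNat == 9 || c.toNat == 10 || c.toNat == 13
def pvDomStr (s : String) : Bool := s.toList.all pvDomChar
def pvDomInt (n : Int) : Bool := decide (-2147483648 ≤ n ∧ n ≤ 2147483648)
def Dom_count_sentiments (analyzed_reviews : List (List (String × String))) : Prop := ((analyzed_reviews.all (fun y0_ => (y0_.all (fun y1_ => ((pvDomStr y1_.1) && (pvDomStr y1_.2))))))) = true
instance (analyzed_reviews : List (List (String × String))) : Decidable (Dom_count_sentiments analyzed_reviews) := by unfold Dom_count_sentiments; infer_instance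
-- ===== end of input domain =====

-- B maps each review to a unit 3-vector with a total delta function and sums componentwise,
-- replacing A's membership-guarded mutable dict accumulator (alternative decomposition, same cost).

-- ===== PORT A =====
def count_sentiments (analyzed_reviews : List (List (String × String))) : List (String × Int) :=
  (analyzed_reviews.foldl
    (fun counts review =>
      let sentiment := (PySem.Dict.mk review).get? "sentiment"
      match sentiment with
      | some s => if counts.contains s then counts.modify s 0 (· + 1) else counts
      | none => counts)
    (PySem.Dict.mk [("positive", 0), ("negative", 0), ("neutral", 0)])).items

-- ===== PORT B =====
def csDelta (s : Option String) : Int × Int × Int :=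
  if s = some "positive" then (1, 0, 0)
  else if s = some "negative" then (0, 1, 0)
  else if s = some "neutral" then (0, 0, 1)
  else (0, 0, 0)

def count_sentiments_alt (analyzed_reviews : List (List (String × String))) : List (String × Int) :=
  let vecs := analyzed_reviews.map (fun r => csDelta ((PySem.Dict.mk r).get? "sentiment"))
  [("positive", (vecs.map (·.1)).sum),
   ("negative", (vecs.map (·.2.1)).sum),
   ("neutral",  (vecs.map (·.2.2)).sum)]

-- ===== PRECONDITION & SPEC =====
def Spec_count_sentiments (analyzed_reviews : List (List (String × String))) (out : List (String × Int)) : Prop := out = count_sentiments_alt analyzed_reviews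
instance (analyzed_reviews : List (List (String × String))) (out : List (String × Int)) : Decidable (Spec_count_sentiments analyzed_reviews out) := by unfold Spec_count_sentiments; infer_instance

-- ===== CLAIM =====
def Claim_equal_count_sentiments : Prop := ∀ (analyzed_reviews : List (List (String × String))), Dom_count_sentiments analyzed_reviews → Spec_count_sentiments analyzed_reviews (count_sentiments analyzed_reviews)

-- ===== LEMMAS AND PROOFS =====

-- Loop invariant: A's fold keeps a 3-key dict whose values are the starting values plus
-- the componentwise sums of B's delta vectors over the reviews processed so far.
lemma cs_loop (ar : List (List (String × String))) (a b c : Int) :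
    ar.foldl
      (fun counts review =>
        let sentiment := (PySem.Dict.mk review).get? "sentiment"
        match sentiment with
        | some s => if counts.contains s then counts.modify s 0 (· + 1) else counts
        | none => counts)
      (PySem.Dict.mk [("positive", a), ("negative", b), ("neutral", c)]) =
    PySem.Dict.mk
      [("positive", a + ((ar.map (fun r => csDelta ((PySem.Dict.mk r).get? "sentiment"))).map (·.1)).sum),
       ("negative", b + ((ar.map (fun r => csDelta ((PySem.Dict.mk r).get? "sentiment"))).map (·.2.1)).sum),
       ("neutral",  c + ((ar.map (fun r => csDelta ((PySem.Dict.mk r).get? "sentiment"))).map (·.2.2)).sum)] := by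
  induction ar generalizing a b c with
  | nil => simp
  | cons r rest ih =>
    simp only [List.foldl_cons, List.map_cons]
    cases h : (PySem.Dict.mk r).get? "sentiment" with
    | none =>
      simp [ih, csDelta]
    | some s =>
      by_cases hp : s = "positive"
      · subst hp
        have hm : (PySem.Dict.mk [("positive", a), ("negative", b), ("neutral", c)]).modify "positive" 0 (· + 1)
            = PySem.Dict.mk [("positive", a + 1), ("negative", b), ("neutral", c)] := by
          simp [PySem.Dict.modify, PySem.Dict.insert, PySem.Dict.getD, PySem.Dict.get?]
        simp [hm, ih, csDelta]
        ring
      · by_cases hn : s = "negative"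
        · subst hn
          have hm : (PySem.Dict.mk [("positive", a), ("negative", b), ("neutral", c)]).modify "negative" 0 (· + 1)
              = PySem.Dict.mk [("positive", a), ("negative", b + 1), ("neutral", c)] := by
            simp [PySem.Dict.modify, PySem.Dict.insert, PySem.Dict.getD, PySem.Dict.get?]
          simp [hm, ih, csDelta]
          ring
        · by_cases hu : s = "neutral"
          · subst hu
            have hm : (PySem.Dict.mk [("positive", a), ("negative", b), ("neutral", c)]).modify "neutral" 0 (· + 1)
                = PySem.Dict.mk [("positive", a), ("negative", b), ("neutral", c + 1)] := by
              simp [PySem.Dict.modify, PySem.Dict.insert, PySem.Dict.getD, PySem.Dict.get?]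
            simp [hm, ih, csDelta]
            ring
          · have hc : (PySem.Dict.mk [("positive", a), ("negative", b), ("neutral", c)]).contains s = false := by
              simp [PySem.Dict.contains_mk]
              exact ⟨fun e => hp e.symm, fun e => hn e.symm, fun e => hu e.symm⟩
            simp [hc, ih, csDelta, hp, hn, hu]

-- ===== VERDICT =====
theorem count_sentiments_spec : Claim_equal_count_sentiments := by
  intro ar _
  unfold Spec_count_sentiments count_sentiments count_sentiments_alt
  rw [cs_loop]
  simp
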